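-- pv_equiv track=rewrite | github.com/jelledochy/estate-chat-V2 | streamlit_app/pages/1_main.py | detect_query_topics
-- ===== SOURCE A (Python) =====
-- def detect_query_topics(query: str | None) -> set[str]:
--     normalized = str(query or "").casefold()
--     if not normalized:
--         return set()
--
--     topics: set[str] = set()
--     if any(token in normalized for token in ("own", "owner", "ownership")):
--         topics.add("ownership")
--     if any(
--         token in normalized
--         for token in ("timeline", "chronolog", "when", "before", "after", "event")
--     ):
--         topics.add("timeline")
--     if any(
--         token in normalized
--         for token in ("related", "relationship", "family", "parent", "child", "spouse", "married")
--     ):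
--         topics.add("relationship")
--     if any(token in normalized for token in ("donat", "gift")):
--         topics.add("donation")
--     if any(token in normalized for token in ("will", "beneficiar", "inherit")):
--         topics.add("will")
--     if any(token in normalized for token in ("power of attorney", "poa", "attorney")):
--         topics.add("poa")
--     if any(token in normalized for token in ("mortgage", "loan", "borrower", "lender")):
--         topics.add("mortgage")
--
--     return topics
-- ===== SOURCE B (Python) =====
-- _TOPIC_TOKENS = (
--     ("ownership", ("own", "owner", "ownership")),
--     ("timeline", ("timeline", "chronolog", "when", "before", "after", "event")),
--     ("relationship", ("related", "relationship", "family", "parent", "child", "spouse", "married")),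
--     ("donation", ("donat", "gift")),
--     ("will", ("will", "beneficiar", "inherit")),
--     ("poa", ("power of attorney", "poa", "attorney")),
--     ("mortgage", ("mortgage", "loan", "borrower", "lender")),
-- )
--
-- _ALL_TOKENS = (
--     "own", "owner", "ownership",
--     "timeline", "chronolog", "when", "before", "after", "event",
--     "related", "relationship", "family", "parent", "child", "spouse", "married",
--     "donat", "gift",
--     "will", "beneficiar", "inherit",
--     "power of attorney", "poa", "attorney",
--     "mortgage", "loan", "borrower", "lender",
-- )
--
--
-- def detect_query_topics(query):
--     # Stage 1: one sweep over the text positions, prefix-matching every trigger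
--     # token at each position, collecting the set of tokens that occur.
--     normalized = str(query or "").casefold()
--     hits = set()
--     for i in range(len(normalized)):
--         for tok in _ALL_TOKENS:
--             if normalized.startswith(tok, i):
--                 hits.add(tok)
--     # Stage 2: map the found tokens to topics, in the fixed topic order.
--     topics = set()
--     for topic, tokens in _TOPIC_TOKENS:
--         if any(tok in hits for tok in tokens):
--             topics.add(topic)
--     return topics
-- ===== Notes on version B (the rewrite author's own statement) =====
-- stated objective: alternative
-- what changed: Instead of running a separate substring scan of the query for each of the 27 trigger tokens inside seven branches, B makes one sweep over the text positions prefix-matching all tokens at each position to collect the set of occurring tokens, then a second staged pass maps found tokens to topics in fixed topic order.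
import Mathlib
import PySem

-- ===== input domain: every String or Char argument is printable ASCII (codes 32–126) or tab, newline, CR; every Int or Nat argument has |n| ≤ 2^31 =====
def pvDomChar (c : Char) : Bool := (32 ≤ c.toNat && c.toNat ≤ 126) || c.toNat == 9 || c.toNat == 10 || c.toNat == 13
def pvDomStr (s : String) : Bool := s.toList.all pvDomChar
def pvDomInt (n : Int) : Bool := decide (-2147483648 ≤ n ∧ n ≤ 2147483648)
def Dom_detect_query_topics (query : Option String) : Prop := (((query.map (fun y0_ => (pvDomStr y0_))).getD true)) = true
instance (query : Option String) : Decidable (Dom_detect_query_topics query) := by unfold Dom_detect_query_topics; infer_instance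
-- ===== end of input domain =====

-- B replaces A's per-token substring scans (seven branches, each scanning the query once
-- per token) by one sweep over the text positions that prefix-matches all trigger tokens
-- and collects the occurring tokens, then a staged token→topic pass (objective: alternative).

-- ===== PORT A =====
-- casefold = ASCII lower on the stated printable-ASCII domain (PySem.Str.lower is exact there)
def detect_query_topics (query : Option String) : List String :=
  let normalized := PySem.Str.lower (query.getD "")
  if normalized = "" then PySem.Set.empty
  else
    let topics : PySem.Set String := PySem.Set.empty
    let topics := if ["own", "owner", "ownership"].any (fun t => PySem.Str.isIn t normalized) then PySem.Set.add topics "ownership" else topics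
    let topics := if ["timeline", "chronolog", "when", "before", "after", "event"].any (fun t => PySem.Str.isIn t normalized) then PySem.Set.add topics "timeline" else topics
    let topics := if ["related", "relationship", "family", "parent", "child", "spouse", "married"].any (fun t => PySem.Str.isIn t normalized) then PySem.Set.add topics "relationship" else topics
    let topics := if ["donat", "gift"].any (fun t => PySem.Str.isIn t normalized) then PySem.Set.add topics "donation" else topics
    let topics := if ["will", "beneficiar", "inherit"].any (fun t => PySem.Str.isIn t normalized) then PySem.Set.add topics "will" else topics
    let topics := if ["power of attorney", "poa", "attorney"].any (fun t => PySem.Str.isIn t normalized) then PySem.Set.add topics "poa" else topics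
    let topics := if ["mortgage", "loan", "borrower", "lender"].any (fun t => PySem.Str.isIn t normalized) then PySem.Set.add topics "mortgage" else topics
    topics

-- ===== PORT B =====
-- the literal tables of Source B
def pvTopicTokens : List (String × List String) :=
  [ ("ownership", ["own", "owner", "ownership"]),
    ("timeline", ["timeline", "chronolog", "when", "before", "after", "event"]),
    ("relationship", ["related", "relationship", "family", "parent", "child", "spouse", "married"]),
    ("donation", ["donat", "gift"]),
    ("will", ["will", "beneficiar", "inherit"]),
    ("poa", ["power of attorney", "poa", "attorney"]),
    ("mortgage", ["mortgage", "loan", "borrower", "lender"]) ]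

def pvAllTokens : List String :=
  [ "own", "owner", "ownership",
    "timeline", "chronolog", "when", "before", "after", "event",
    "related", "relationship", "family", "parent", "child", "spouse", "married",
    "donat", "gift",
    "will", "beneficiar", "inherit",
    "power of attorney", "poa", "attorney",
    "mortgage", "loan", "borrower", "lender" ]

-- normalized.startswith(tok, i) is ported by hand as a prefix test on the dropped
-- character list (exact for 0 ≤ i, the only indices range produces)
def detect_query_topics_alt (query : Option String) : List String :=
  let normalized := PySem.Str.lower (query.getD "")
  let cs := normalized.toList
  let hits : PySem.Set String :=
    (PySem.List.pyRange 0 cs.length 1).foldl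
      (fun h i =>
        pvAllTokens.foldl
          (fun h tok =>
            if PySem.Chars.startswith (cs.drop i.toNat) tok.toList then PySem.Set.add h tok else h)
          h)
      PySem.Set.empty
  pvTopicTokens.foldl
    (fun topics p =>
      if p.2.any (fun tok => PySem.Set.contains hits tok) then PySem.Set.add topics p.1 else topics)
    PySem.Set.empty

-- ===== PRECONDITION & SPEC =====
def Spec_detect_query_topics (query : Option String) (out : List String) : Prop := out = detect_query_topics_alt query
instance (query : Option String) (out : List String) : Decidable (Spec_detect_query_topics query out) := by unfold Spec_detect_query_topics; infer_instance

-- ===== CLAIM (what is proved, stated in full; the proofs are below) =====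
def Claim_equal_detect_query_topics : Prop := ∀ (query : Option String), Dom_detect_query_topics query → Spec_detect_query_topics query (detect_query_topics query)

-- ===== LEMMAS AND PROOFS =====

-- membership after the inner token loop
theorem pv_mem_foldl_add_if (C : String → Bool) :
    ∀ (toks : List String) (h : PySem.Set String) (x : String),
      (x ∈ toks.foldl (fun h t => if C t then PySem.Set.add h t else h) h) ↔
        (x ∈ h ∨ (x ∈ toks ∧ C x = true)) := by
  intro toks
  induction toks with
  | nil => intro h x; simp
  | cons t ts ih =>
    intro h x
    simp only [List.foldl_cons]
    rw [ih]
    by_cases hc : C t = true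
    · simp [hc, PySem.Set.mem_add]
      constructor
      · rintro ((hx | rfl) | hx)
        · exact Or.inl hx
        · exact Or.inr ⟨Or.inl rfl, hc⟩
        · exact Or.inr ⟨Or.inr hx.1, hx.2⟩
      · rintro (hx | ⟨(rfl | hx), hC⟩)
        · exact Or.inl (Or.inl hx)
        · exact Or.inl (Or.inr rfl)
        · exact Or.inr ⟨hx, hC⟩
    · simp [hc]
      constructor
      · rintro (hx | hx)
        · exact Or.inl hx
        · exact Or.inr ⟨Or.inr hx.1, hx.2⟩
      · rintro (hx | ⟨(rfl | hx), hC⟩)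
        · exact Or.inl hx
        · exact absurd hC hc
        · exact Or.inr ⟨hx, hC⟩

-- membership after the position sweep
theorem pv_mem_sweep (cs : List Char) :
    ∀ (is : List Int) (h : PySem.Set String) (x : String),
      (x ∈ is.foldl
          (fun h i =>
            pvAllTokens.foldl
              (fun h tok =>
                if PySem.Chars.startswith (cs.drop i.toNat) tok.toList then PySem.Set.add h tok else h)
              h)
          h) ↔
        (x ∈ h ∨ (x ∈ pvAllTokens ∧ ∃ i ∈ is, PySem.Chars.startswith (cs.drop i.toNat) x.toList = true)) := by
  intro is
  induction is with
  | nil => intro h x; simp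
  | cons i ts ih =>
    intro h x
    simp only [List.foldl_cons]
    rw [ih]
    rw [pv_mem_foldl_add_if]
    constructor
    · rintro ((hx | ⟨hmem, hC⟩) | ⟨hmem, j, hj, hC⟩)
      · exact Or.inl hx
      · exact Or.inr ⟨hmem, i, List.mem_cons_self .., hC⟩
      · exact Or.inr ⟨hmem, j, List.mem_cons_of_mem _ hj, hC⟩
    · rintro (hx | ⟨hmem, j, hj, hC⟩)
      · exact Or.inl (Or.inl hx)
      · rcases List.mem_cons.mp hj with rfl | hj
        · exact Or.inl (Or.inr ⟨hmem, hC⟩)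
        · exact Or.inr ⟨hmem, j, hj, hC⟩

-- the collected set contains exactly the tokens occurring in the text
theorem pv_hits_spec (s : String) (tok : String) (htok : tok ∈ pvAllTokens) :
    PySem.Set.contains
        ((PySem.List.pyRange 0 s.toList.length 1).foldl
          (fun h i =>
            pvAllTokens.foldl
              (fun h t =>
                if PySem.Chars.startswith (s.toList.drop i.toNat) t.toList then PySem.Set.add h t else h)
              h)
          PySem.Set.empty) tok
      = PySem.Str.isIn tok s := by
  have hne : tok.toList ≠ [] := by
    fin_cases htok <;> decide
  rw [Bool.eq_iff_iff, PySem.Set.contains_iff, PySem.Str.isIn_iff_infix, pv_mem_sweep]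
  constructor
  · rintro (hx | ⟨_, i, hi, hC⟩)
    · simp [PySem.Set.empty] at hx
    · exact List.IsPrefix.isInfix ((PySem.Chars.startswith_iff _ _).mp hC) |>.trans (List.drop_suffix _ _).isInfix
  · intro hinf
    refine Or.inr ⟨htok, ?_⟩
    have : ∃ j, tok.toList <+: s.toList.drop j := by
      rcases hinf with ⟨pre, suf, hps⟩
      exact ⟨pre.length, by rw [← hps]; simp [List.drop_left' (l₁ := pre) rfl]⟩
    rcases this with ⟨j, hj⟩
    have hjlt : j < s.toList.length := by
      by_contra hge
      have : s.toList.drop j = [] := List.drop_eq_nil_of_le (by omega)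
      rw [this] at hj
      exact hne (List.prefix_nil.mp hj)
    refine ⟨(j : Int), ?_, ?_⟩
    · rw [PySem.List.mem_pyRange_one]; omega
    · rw [PySem.Chars.startswith_iff]; simpa using hj

-- ===== VERDICT (by name: the statement is the Claim_ definition above) =====
theorem detect_query_topics_spec : Claim_equal_detect_query_topics := by
  intro query _
  unfold Spec_detect_query_topics
  unfold detect_query_topics detect_query_topics_alt
  set s := PySem.Str.lower (query.getD "") with hs
  by_cases h0 : s = ""
  · rw [if_pos h0, h0]
    decide
  · rw [if_neg h0]
    simp only [pvTopicTokens, List.foldl_cons, List.foldl_nil, List.any_cons, List.any_nil]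
    rw [pv_hits_spec s "own" (by decide),
      pv_hits_spec s "owner" (by decide),
      pv_hits_spec s "ownership" (by decide),
      pv_hits_spec s "timeline" (by decide),
      pv_hits_spec s "chronolog" (by decide),
      pv_hits_spec s "when" (by decide),
      pv_hits_spec s "before" (by decide),
      pv_hits_spec s "after" (by decide),
      pv_hits_spec s "event" (by decide),
      pv_hits_spec s "related" (by decide),
      pv_hits_spec s "relationship" (by decide),
      pv_hits_spec s "family" (by decide),
      pv_hits_spec s "parent" (by decide),
      pv_hits_spec s "child" (by decide),
      pv_hits_spec s "spouse" (by decide),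
      pv_hits_spec s "married" (by decide),
      pv_hits_spec s "donat" (by decide),
      pv_hits_spec s "gift" (by decide),
      pv_hits_spec s "will" (by decide),
      pv_hits_spec s "beneficiar" (by decide),
      pv_hits_spec s "inherit" (by decide),
      pv_hits_spec s "power of attorney" (by decide),
      pv_hits_spec s "poa" (by decide),
      pv_hits_spec s "attorney" (by decide),
      pv_hits_spec s "mortgage" (by decide),
      pv_hits_spec s "loan" (by decide),
      pv_hits_spec s "borrower" (by decide),
      pv_hits_spec s "lender" (by decide)]
    rfl
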